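-- pv_equiv track=rewrite | github.com/hariharanragothaman/codeforces-solutions | problems/1433/1433A-boring-apartments.py | solve
-- ===== SOURCE A (Python) =====
-- def solve(num):
--     snum = str(num)
--     start = snum[0]
--     n = len(snum)
--     total = 0
--
--     each_level_count = 10
--     total += (int(start)-1) * each_level_count
--
--     for i in range(1, n+1):
--         total += i
--
--     return total
-- ===== SOURCE B (Python) =====
-- def solve(num):
--     lead = num
--     digits = 1
--     while lead >= 10:
--         lead //= 10
--         digits += 1
--     return (lead - 1) * 10 + digits * (digits + 1) // 2
-- ===== Notes on version B (the rewrite author's own statement) =====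
-- stated objective: alternative
-- what changed: B drops the string conversion entirely: it finds the leading digit and digit count by repeated integer division by 10 and replaces the accumulation loop 1+2+...+n by the closed form digits*(digits+1)//2.
import Mathlib
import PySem

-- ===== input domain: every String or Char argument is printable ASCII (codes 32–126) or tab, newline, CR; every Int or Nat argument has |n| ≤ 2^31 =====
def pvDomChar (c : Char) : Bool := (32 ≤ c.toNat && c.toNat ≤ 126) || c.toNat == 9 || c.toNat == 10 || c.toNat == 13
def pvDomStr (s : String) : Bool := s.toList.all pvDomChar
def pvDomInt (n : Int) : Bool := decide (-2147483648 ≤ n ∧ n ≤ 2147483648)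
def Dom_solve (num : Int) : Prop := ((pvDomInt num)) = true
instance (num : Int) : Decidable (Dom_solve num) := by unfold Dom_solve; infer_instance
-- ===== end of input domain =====

-- B replaces A's string-based digit extraction and accumulation loop by pure integer
-- arithmetic: a division-by-10 loop for the leading digit and digit count, and the
-- closed-form Gauss sum digits*(digits+1)//2 (alternative algorithm of the same cost).

-- ===== PORT A =====
def solve (num : Int) : Int :=
  let snum := PySem.Int.toChars num
  let start := (PySem.List.pyGet? snum 0).getD ' '          -- snum[0]; never fails (str(num) is nonempty)
  let n := PySem.List.len snum
  let total : Int := 0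
  let eachLevelCount : Int := 10
  let total := total + ((PySem.Int.ofChars? [start]).getD 0 - 1) * eachLevelCount
  -- int(start) raises ValueError for '-' (num < 0): excluded by Pre_solve; getD 0 is never used inside Pre_
  let total := (PySem.List.pyRange 1 (n + 1) 1).foldl (fun t i => t + i) total
  total

-- ===== PORT B =====
-- the 'while lead >= 10: lead //= 10; digits += 1' loop of Source B, state (lead, digits)
def solveAltLoop (lead : Int) (digits : Int) : Int × Int :=
  if h : 10 ≤ lead then
    solveAltLoop (PySem.Int.floordiv lead 10) (digits + 1)
  else
    (lead, digits)
termination_by lead.toNat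
decreasing_by
  have h1 : PySem.Int.floordiv lead 10 = lead / 10 :=
    PySem.Int.floordiv_eq_ediv_of_pos (by omega)
  rw [h1]; omega

def solve_alt (num : Int) : Int :=
  let p := solveAltLoop num 1
  (p.1 - 1) * 10 + PySem.Int.floordiv (p.2 * (p.2 + 1)) 2

-- ===== PRECONDITION & SPEC =====
-- Pre_ excludes num < 0: there str(num)[0] = '-' and int('-') raises ValueError in A.
def Pre_solve (num : Int) : Prop := 0 ≤ num
instance (num : Int) : Decidable (Pre_solve num) := by unfold Pre_solve; infer_instance
def pvWitness_solve : Int := 37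
def Spec_solve (num : Int) (out : Int) : Prop := out = solve_alt num
instance (num : Int) (out : Int) : Decidable (Spec_solve num out) := by unfold Spec_solve; infer_instance

-- ===== CLAIM (what is proved, stated in full; the proofs are below) =====
def Claim_equal_solve : Prop := ∀ (num : Int), Dom_solve num → Pre_solve num → Spec_solve num (solve num)

-- ===== LEMMAS AND PROOFS =====

-- proof-side helpers: leading digit and digit count of a natural number
def leadNat (m : Nat) : Nat :=
  if h : m < 10 then m else leadNat (m / 10)
termination_by m
decreasing_by omega

def ndigits (m : Nat) : Nat :=
  if h : m < 10 then 1 else ndigits (m / 10) + 1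
termination_by m
decreasing_by omega

theorem leadNat_lt (m : Nat) : leadNat m < 10 := by
  induction m using Nat.strong_induction_on with
  | _ m ih =>
    rw [leadNat]
    split
    · omega
    · exact ih (m / 10) (by omega)

theorem ndigits_pos (m : Nat) : 1 ≤ ndigits m := by
  induction m using Nat.strong_induction_on with
  | _ m ih =>
    rw [ndigits]
    split
    · omega
    · have := ih (m / 10) (by omega); omega

-- Nat.toDigitsCore: the accumulator is just appended
theorem toDigitsCore_acc (f : Nat) : ∀ (n : Nat) (acc : List Char),
    Nat.toDigitsCore 10 f n acc = Nat.toDigitsCore 10 f n [] ++ acc := by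
  induction f with
  | zero => intro n acc; simp [Nat.toDigitsCore]
  | succ f ih =>
    intro n acc
    simp only [Nat.toDigitsCore]
    split
    · simp
    · rw [ih (n / 10) (Nat.digitChar (n % 10) :: acc),
        ih (n / 10) [Nat.digitChar (n % 10)]]
      simp

-- any sufficient fuel gives the same digits
theorem toDigitsCore_fuel (n : Nat) : ∀ (f g : Nat), n < f → n < g →
    Nat.toDigitsCore 10 f n [] = Nat.toDigitsCore 10 g n [] := by
  induction n using Nat.strong_induction_on with
  | _ n ih =>
    intro f g hf hg
    match f, g with
    | f + 1, g + 1 =>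
      simp only [Nat.toDigitsCore]
      split
      · rfl
      · rename_i hdiv
        rw [toDigitsCore_acc, toDigitsCore_acc g,
          ih (n / 10) (by omega) f g (by omega) (by omega)]

-- unfolding equations for Nat.toDigits at base 10
theorem toDigits_lt (m : Nat) (h : m < 10) : Nat.toDigits 10 m = [Nat.digitChar m] := by
  simp only [Nat.toDigits, Nat.toDigitsCore]
  rw [if_pos (by omega : m / 10 = 0), Nat.mod_eq_of_lt h]

theorem toDigits_ge (m : Nat) (h : 10 ≤ m) :
    Nat.toDigits 10 m = Nat.toDigits 10 (m / 10) ++ [Nat.digitChar (m % 10)] := by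
  conv_lhs => rw [Nat.toDigits, Nat.toDigitsCore]
  rw [if_neg (by omega : ¬ m / 10 = 0), toDigitsCore_acc,
    toDigitsCore_fuel (m / 10) m (m / 10 + 1) (by omega) (by omega)]
  rfl

theorem toDigits_length (m : Nat) : (Nat.toDigits 10 m).length = ndigits m := by
  induction m using Nat.strong_induction_on with
  | _ m ih =>
    rw [ndigits]
    split
    · rename_i h; rw [toDigits_lt m h]; rfl
    · rename_i h
      rw [toDigits_ge m (by omega), List.length_append, ih (m / 10) (by omega)]
      rfl

theorem toDigits_head (m : Nat) :
    (Nat.toDigits 10 m)[0]? = some (Nat.digitChar (leadNat m)) := by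
  induction m using Nat.strong_induction_on with
  | _ m ih =>
    rw [leadNat]
    split
    · rename_i h; rw [toDigits_lt m h]; rfl
    · rename_i h
      rw [toDigits_ge m (by omega), List.getElem?_append_left, ih (m / 10) (by omega)]
      rw [toDigits_length]
      have := ndigits_pos (m / 10)
      omega

-- int(str of a single decimal digit character) is that digit
theorem ofChars?_digitChar (k : Nat) (h : k < 10) :
    PySem.Int.ofChars? [Nat.digitChar k] = some (k : Int) := by
  interval_cases k <;> decide

-- B's while loop computes the leading digit and adds the digit count minus one
theorem solveAltLoop_spec (m : Nat) : ∀ (dg : Int),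
    solveAltLoop (m : Int) dg = ((leadNat m : Int), dg + (ndigits m : Int) - 1) := by
  induction m using Nat.strong_induction_on with
  | _ m ih =>
    intro dg
    rw [solveAltLoop, leadNat, ndigits]
    by_cases h : 10 ≤ m
    · rw [dif_pos (by exact_mod_cast h), dif_neg (by omega), dif_neg (by omega)]
      have hfd : PySem.Int.floordiv (m : Int) 10 = ((m / 10 : Nat) : Int) := by
        rw [PySem.Int.floordiv_eq_ediv_of_pos (by omega)]
        omega
      rw [hfd, ih (m / 10) (by omega) (dg + 1)]
      simp only [Prod.mk.injEq]
      exact ⟨trivial, by push_cast; ring⟩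
    · rw [dif_neg (by exact_mod_cast h), dif_pos (by omega), dif_pos (by omega)]
      simp

-- folding addition over range(1, m+1) starting from c gives c + m*(m+1)/2
theorem pv_gauss (m : Nat) (c : Int) :
    (PySem.List.pyRange 1 ((m : Int) + 1) 1).foldl (fun t i => t + i) c
      = c + ((m : Int) * ((m : Int) + 1)) / 2 := by
  induction m generalizing c with
  | zero =>
      rw [show ((0 : Nat) : Int) + 1 = 1 by norm_num,
          PySem.List.pyRange_one_eq_nil (le_refl 1)]
      simp
  | succ k ih =>
      rw [show ((k + 1 : Nat) : Int) + 1 = ((k : Int) + 1) + 1 by push_cast; ring,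
          PySem.List.pyRange_one_succ_right (by omega : (1 : Int) ≤ (k : Int) + 1),
          List.foldl_append, ih]
      simp only [List.foldl_cons, List.foldl_nil]
      push_cast
      have h : ((k:Int) + 1) * ((k:Int) + 1 + 1) = (k:Int) * ((k:Int) + 1) + 2 * ((k:Int) + 1) := by
        ring
      omega

-- ===== VERDICT (by name: the statement is the Claim_ definition above) =====
theorem solve_spec : Claim_equal_solve := by
  intro num _ hpre
  obtain ⟨m, rfl⟩ : ∃ m : Nat, num = (m : Int) := ⟨num.toNat, (Int.toNat_of_nonneg hpre).symm⟩
  unfold Spec_solve solve solve_alt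
  have htc : PySem.Int.toChars (m : Int) = Nat.toDigits 10 m := by
    simp [PySem.Int.toChars, Int.not_lt.mpr (by positivity : (0:Int) ≤ (m:Int))]
  simp only [htc, PySem.List.pyGet?_zero, toDigits_head, Option.getD_some,
    PySem.List.len_eq, toDigits_length, solveAltLoop_spec m 1,
    ofChars?_digitChar (leadNat m) (leadNat_lt m)]
  rw [pv_gauss (ndigits m)]
  rw [PySem.Int.floordiv_eq_ediv_of_pos (by omega : (0:Int) < 2)]
  ring_nf
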